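-- pv_equiv track=rewrite | github.com/seokzin/algorithm-python | Code/Programmers/[lv2]더맵게-실패1.py | solution
-- ===== SOURCE A (Python) =====
-- def solution(sco, k):
--     cnt = 0
--
--     while min(sco) < k and len(sco) >= 2:
--         sco.sort()
--         a = sco.pop(0)
--         b = sco.pop(0)
--         sco.append(a + (2*b))
--         cnt += 1
--
--     if min(sco) < k:
--         cnt = -1
--
--     return cnt
-- ===== SOURCE B (Python) =====
-- def _insert_sorted(h, v):
--     # linear insertion into an ascending list (after equal elements)
--     out = []
--     i = 0
--     while i < len(h) and h[i] <= v:
--         out.append(h[i])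
--         i += 1
--     out.append(v)
--     return out + h[i:]
--
--
-- def solution(sco, k):
--     h = sorted(sco)
--     cnt = 0
--     while len(h) >= 2 and h[0] < k:
--         v = h[0] + 2 * h[1]
--         h = _insert_sorted(h[2:], v)
--         cnt += 1
--     return -1 if h[0] < k else cnt
-- ===== Notes on version B (the rewrite author's own statement) =====
-- stated objective: faster
-- what changed: B sorts the list once and then maintains sortedness by a single linear insertion of each new mixed score, instead of A's re-sorting the whole list (plus a separate min scan and two pop(0) shifts) on every loop iteration.
import Mathlib
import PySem

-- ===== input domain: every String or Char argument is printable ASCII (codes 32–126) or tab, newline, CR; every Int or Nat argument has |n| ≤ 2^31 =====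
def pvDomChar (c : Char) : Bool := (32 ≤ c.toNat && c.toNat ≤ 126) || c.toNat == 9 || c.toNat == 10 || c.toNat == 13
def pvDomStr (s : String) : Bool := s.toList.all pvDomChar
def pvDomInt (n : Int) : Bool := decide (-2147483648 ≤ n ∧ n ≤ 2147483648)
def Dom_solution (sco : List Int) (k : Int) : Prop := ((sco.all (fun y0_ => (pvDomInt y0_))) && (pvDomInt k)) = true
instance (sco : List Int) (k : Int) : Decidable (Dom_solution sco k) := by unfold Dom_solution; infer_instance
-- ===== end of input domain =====

-- B sorts once and maintains the sorted list by linear insertion instead of re-sorting every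
-- iteration (objective: faster by a constant factor; A also mutates `sco` in place — the
-- equivalence proved here is about the RETURN value only, B does not mutate its argument).

-- ===== PORT A =====
-- the while loop: min(sco) < k and len(sco) >= 2 → sort, pop two smallest, append a + 2*b
def solutionWhile (sco : List Int) (k : Int) (cnt : Int) : List Int × Int :=
  match PySem.List.min? sco (fun x => x) with
  | none => (sco, cnt)      -- min([]) raises ValueError; only reachable for sco = [], excluded by Pre_
  | some m =>
    if m < k ∧ 2 ≤ sco.length then
      match h : PySem.List.sorted sco (fun x => x) false with
      | a :: b :: rest => solutionWhile (rest ++ [a + 2 * b]) k (cnt + 1)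
      | _ => (sco, cnt)     -- unreachable: sorting preserves the length ≥ 2
    else (sco, cnt)
termination_by sco.length
decreasing_by
  have hl := PySem.List.length_sorted (xs := sco) (key := fun x : Int => x) (rev := false)
  rw [h] at hl
  simp at hl ⊢
  omega

def solution (sco : List Int) (k : Int) : Int :=
  let r := solutionWhile sco k 0
  match PySem.List.min? r.1 (fun x => x) with
  | none => 0               -- min([]) raises; only reachable for sco = [], excluded by Pre_
  | some m => if m < k then -1 else r.2

-- ===== PORT B =====
-- _insert_sorted: keep the elements ≤ v, then v, then the rest
def insertSorted (v : Int) : List Int → List Int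
  | [] => [v]
  | y :: ys => if y ≤ v then y :: insertSorted v ys else v :: y :: ys

theorem length_insertSorted (v : Int) (l : List Int) :
    (insertSorted v l).length = l.length + 1 := by
  induction l with
  | nil => rfl
  | cons y ys ih => simp only [insertSorted]; split <;> simp [ih]

-- the while loop over the sorted list h, merged with the final `-1 if h[0] < k else cnt`
def solutionAltLoop (h : List Int) (k : Int) (cnt : Int) : Int :=
  match h with
  | [] => 0                 -- h[0] raises IndexError; only reachable for sco = [], excluded by Pre_
  | [a] => if a < k then -1 else cnt
  | a :: b :: rest =>
    if a < k then solutionAltLoop (insertSorted (a + 2 * b) rest) k (cnt + 1)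
    else cnt
termination_by h.length
decreasing_by simp [length_insertSorted]

def solution_alt (sco : List Int) (k : Int) : Int :=
  solutionAltLoop (PySem.List.sorted sco (fun x => x) false) k 0

-- ===== PRECONDITION & SPEC =====
-- Pre_ excludes only the empty list, on which A raises ValueError (min of empty sequence).
def Pre_solution (sco : List Int) (k : Int) : Prop := sco ≠ []
instance (sco : List Int) (k : Int) : Decidable (Pre_solution sco k) := by unfold Pre_solution; infer_instance
def pvWitness_solution : List Int × Int := ([1, 2, 3], 7)

def Spec_solution (sco : List Int) (k : Int) (out : Int) : Prop := out = solution_alt sco k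
instance (sco : List Int) (k : Int) (out : Int) : Decidable (Spec_solution sco k out) := by unfold Spec_solution; infer_instance

-- ===== CLAIM (what is proved, stated in full; the proofs are below) =====
def Claim_equal_solution : Prop := ∀ (sco : List Int) (k : Int), Dom_solution sco k → Pre_solution sco k → Spec_solution sco k (solution sco k)

-- ===== LEMMAS AND PROOFS =====

theorem insertSorted_perm (v : Int) (l : List Int) :
    (insertSorted v l).Perm (l ++ [v]) := by
  induction l with
  | nil => rfl
  | cons y ys ih =>
    simp only [insertSorted]
    split
    · exact (ih.cons y)
    · exact (List.perm_append_singleton v (y :: ys)).symm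

theorem insertSorted_pairwise (v : Int) (l : List Int)
    (hl : l.Pairwise (· ≤ ·)) : (insertSorted v l).Pairwise (· ≤ ·) := by
  induction l with
  | nil => simp [insertSorted]
  | cons y ys ih =>
    rcases List.pairwise_cons.mp hl with ⟨hy, hys⟩
    simp only [insertSorted]
    split
    · rename_i hyv
      refine List.pairwise_cons.mpr ⟨?_, ih hys⟩
      intro z hz
      rcases (List.Perm.mem_iff (insertSorted_perm v ys)).mp hz with hz'
      simp at hz'
      rcases hz' with hz' | hz'
      · exact hy z hz'
      · omega
    · rename_i hyv
      refine List.pairwise_cons.mpr ⟨?_, hl⟩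
      intro z hz
      simp at hz
      rcases hz with hz | hz
      · omega
      · have := hy z hz; omega

theorem sorted_append_singleton (rest : List Int) (v : Int)
    (h : rest.Pairwise (· ≤ ·)) :
    PySem.List.sorted (rest ++ [v]) (fun x => x) false = insertSorted v rest :=
  PySem.List.sorted_id_eq_of_perm_of_pairwise (rest ++ [v]) (insertSorted v rest)
    (insertSorted_perm v rest) (insertSorted_pairwise v rest h)

theorem min?_eq_sorted_head (sco : List Int) (a : Int) (t : List Int)
    (h : PySem.List.sorted sco (fun x => x) false = a :: t) :
    PySem.List.min? sco (fun x => x) = some a := by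
  have hne : sco ≠ [] := by
    intro h0; rw [h0] at h; simp [PySem.List.sorted] at h
  obtain ⟨m, hm⟩ : ∃ m, PySem.List.min? sco (fun x => x) = some m := by
    cases hmin : PySem.List.min? sco (fun x => x) with
    | none => exact absurd ((PySem.List.min?_eq_none_iff sco _).mp hmin) hne
    | some m => exact ⟨m, rfl⟩
  have hmmem : m ∈ sco := PySem.List.min?_mem hm
  have hamem : a ∈ sco := by
    have : a ∈ PySem.List.sorted sco (fun x => x) false := by rw [h]; simp
    exact (PySem.List.mem_sorted sco _ false a).mp this
  have h1 : m ≤ a := PySem.List.min?_isMin hm a hamem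
  have h2 : a ≤ m := PySem.List.key_head_sorted_le sco (fun x => x) h m hmmem
  rw [hm]; congr 1; omega

theorem solutionWhile_step (sco : List Int) (k cnt a b : Int) (rest : List Int)
    (hmin : PySem.List.min? sco (fun x => x) = some a)
    (hs : PySem.List.sorted sco (fun x => x) false = a :: b :: rest)
    (hak : a < k) :
    solutionWhile sco k cnt = solutionWhile (rest ++ [a + 2 * b]) k (cnt + 1) := by
  have hlen2 : 2 ≤ sco.length := by
    have := PySem.List.length_sorted sco (fun x : Int => x) false
    rw [hs] at this; simp at this; omega
  rw [solutionWhile, hmin]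
  simp only [hak, hlen2, and_self, if_true]
  split
  · rename_i heq
    rw [hs] at heq
    cases heq
    rfl
  · rename_i hno
    exact absurd hs (by intro h; exact hno a b rest h)

theorem solutionWhile_stop (sco : List Int) (k cnt m : Int)
    (hmin : PySem.List.min? sco (fun x => x) = some m)
    (hc : ¬ (m < k ∧ 2 ≤ sco.length)) :
    solutionWhile sco k cnt = (sco, cnt) := by
  rw [solutionWhile, hmin]
  simp only [hc, if_false]

-- the main invariant: A's loop + final check equals B's loop over the sorted list
theorem main_lemma (n : Nat) : ∀ (sco : List Int) (k cnt : Int), sco.length ≤ n → sco ≠ [] →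
    (match PySem.List.min? (solutionWhile sco k cnt).1 (fun x => x) with
     | none => 0
     | some m => if m < k then -1 else (solutionWhile sco k cnt).2)
    = solutionAltLoop (PySem.List.sorted sco (fun x => x) false) k cnt := by
  induction n with
  | zero =>
    intro sco k cnt hlen hne
    exact absurd (List.length_eq_zero_iff.mp (Nat.le_zero.mp hlen)) hne
  | succ n ih =>
    intro sco k cnt hlen hne
    have hsne : PySem.List.sorted sco (fun x => x) false ≠ [] := by
      simp [PySem.List.sorted_eq_nil_iff]; exact hne
    obtain ⟨a, t, hs⟩ : ∃ a t, PySem.List.sorted sco (fun x => x) false = a :: t := by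
      cases hs : PySem.List.sorted sco (fun x => x) false with
      | nil => exact absurd hs hsne
      | cons a t => exact ⟨a, t, rfl⟩
    have hmin := min?_eq_sorted_head sco a t hs
    have hls := PySem.List.length_sorted (xs := sco) (key := fun x : Int => x) (rev := false)
    rw [hs] at hls
    cases t with
    | nil =>
      -- length 1: loop body never runs
      have hlen1 : sco.length = 1 := by simpa using hls.symm
      rw [solutionWhile_stop sco k cnt a hmin (by omega)]
      simp only
      rw [hmin, hs]
      simp [solutionAltLoop]
    | cons b rest =>
      have hlen2 : 2 ≤ sco.length := by simp at hls; omega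
      by_cases hak : a < k
      · -- loop body runs once, then induction
        have hpw : (a :: b :: rest).Pairwise (· ≤ ·) := by
          rw [← hs]; exact PySem.List.sorted_pairwise ..
        have hrestpw : rest.Pairwise (· ≤ ·) := (List.pairwise_cons.mp (List.pairwise_cons.mp hpw).2).2
        have hlen' : (rest ++ [a + 2 * b]).length ≤ n := by
          simp at hls ⊢; omega
        have hne' : rest ++ [a + 2 * b] ≠ [] := by simp
        rw [solutionWhile_step sco k cnt a b rest hmin hs hak]
        rw [ih (rest ++ [a + 2 * b]) k (cnt + 1) hlen' hne']
        rw [sorted_append_singleton rest (a + 2 * b) hrestpw]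
        conv_rhs => rw [hs, solutionAltLoop]
        simp [hak]
      · -- loop exits immediately with min = a ≥ k
        rw [solutionWhile_stop sco k cnt a hmin (by tauto)]
        simp only
        rw [hmin]
        conv_rhs => rw [hs, solutionAltLoop]
        simp [hak]

-- ===== VERDICT (by name: the statement is the Claim_ definition above) =====
theorem solution_spec : Claim_equal_solution := by
  intro sco k _ hpre
  unfold Spec_solution solution solution_alt
  exact main_lemma sco.length sco k 0 le_rfl hpre
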